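-- pv_equiv track=rewrite | github.com/AleRodriguezCruz/tareas_automata | src/Evaluador.py | verificar_tipos
-- ===== SOURCE A (Python) =====
-- def verificar_tipos(tokens):
--     contiene_cadena = False
--     contiene_numero_entero = False
--     contiene_decimal = False
--     contiene_fecha = False
--     contiene_caracteres_especiales = False
--
--     for token in tokens:
--         if token == 200:
--             contiene_cadena = True
--         elif token == 201:
--             contiene_numero_entero = True
--         elif token == 202:
--             contiene_decimal = True
--         elif token == 300:
--             contiene_fecha = True
--         elif token == 888:
--             contiene_caracteres_especiales = True
--
--     return contiene_cadena, contiene_numero_entero, contiene_decimal, contiene_fecha, contiene_caracteres_especiales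
-- ===== SOURCE B (Python) =====
-- def verificar_tipos(tokens):
--     toks = list(tokens)
--     return (200 in toks, 201 in toks, 202 in toks, 300 in toks, 888 in toks)
-- ===== Notes on version B (the rewrite author's own statement) =====
-- stated objective: simpler
-- what changed: Replaces the single-pass branch-dispatch loop that mutates five flags with five independent membership tests over the token list.
import Mathlib
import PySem

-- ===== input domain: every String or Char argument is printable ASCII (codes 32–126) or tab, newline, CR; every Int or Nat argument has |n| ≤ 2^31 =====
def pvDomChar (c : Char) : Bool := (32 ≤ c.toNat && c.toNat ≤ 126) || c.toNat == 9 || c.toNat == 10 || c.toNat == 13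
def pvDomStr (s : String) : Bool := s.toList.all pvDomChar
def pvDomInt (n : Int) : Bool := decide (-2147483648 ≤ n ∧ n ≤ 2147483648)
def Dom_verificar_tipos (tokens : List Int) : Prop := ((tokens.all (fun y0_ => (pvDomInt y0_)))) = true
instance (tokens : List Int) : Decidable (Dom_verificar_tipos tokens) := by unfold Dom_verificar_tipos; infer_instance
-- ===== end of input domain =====

-- B replaces A's single flag-mutating dispatch loop with five independent membership tests (simpler).

-- ===== PORT A =====
-- literal port of A: one fold over the tokens carrying the five flags, branches in A's order
def verificar_tipos (tokens : List Int) : Bool × Bool × Bool × Bool × Bool :=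
  tokens.foldl
    (fun st (token : Int) =>
      let (c, n, d, f, e) := st
      if token = 200 then (true, n, d, f, e)
      else if token = 201 then (c, true, d, f, e)
      else if token = 202 then (c, n, true, f, e)
      else if token = 300 then (c, n, d, true, e)
      else if token = 888 then (c, n, d, f, true)
      else (c, n, d, f, e))
    (false, false, false, false, false)

-- ===== PORT B =====
def verificar_tipos_alt (tokens : List Int) : Bool × Bool × Bool × Bool × Bool :=
  (tokens.contains 200, tokens.contains 201, tokens.contains 202,
   tokens.contains 300, tokens.contains 888)

-- ===== PRECONDITION & SPEC =====
def Spec_verificar_tipos (tokens : List Int) (out : Bool × Bool × Bool × Bool × Bool) : Prop := out = verificar_tipos_alt tokens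
instance (tokens : List Int) (out : Bool × Bool × Bool × Bool × Bool) : Decidable (Spec_verificar_tipos tokens out) := by unfold Spec_verificar_tipos; infer_instance

-- ===== CLAIM (what is proved, stated in full; the proofs are below) =====
def Claim_equal_verificar_tipos : Prop := ∀ (tokens : List Int), Dom_verificar_tipos tokens → Spec_verificar_tipos tokens (verificar_tipos tokens)

-- ===== LEMMAS AND PROOFS =====

-- the fold from an arbitrary start state ORs each flag with the corresponding membership test
theorem verificar_tipos_foldl (tokens : List Int) (c n d f e : Bool) :
    tokens.foldl
      (fun st (token : Int) =>
        let (c, n, d, f, e) := st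
        if token = 200 then (true, n, d, f, e)
        else if token = 201 then (c, true, d, f, e)
        else if token = 202 then (c, n, true, f, e)
        else if token = 300 then (c, n, d, true, e)
        else if token = 888 then (c, n, d, f, true)
        else (c, n, d, f, e))
      (c, n, d, f, e)
    = (c || tokens.contains 200, n || tokens.contains 201, d || tokens.contains 202,
       f || tokens.contains 300, e || tokens.contains 888) := by
  induction tokens generalizing c n d f e with
  | nil => simp
  | cons t ts ih =>
    simp only [List.foldl_cons, List.contains_cons]
    have ne : ∀ (k t : Int), t ≠ k → (k == t) = false :=
      fun k t h => beq_eq_false_iff_ne.mpr (fun hh => h hh.symm)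
    split_ifs with h1 h2 h3 h4 h5
    · rw [ih]; subst h1; simp
    · rw [ih]; subst h2; simp
    · rw [ih]; subst h3; simp
    · rw [ih]; subst h4; simp
    · rw [ih]; subst h5; simp
    · rw [ih]; simp [ne _ _ h1, ne _ _ h2, ne _ _ h3, ne _ _ h4, ne _ _ h5]

-- ===== VERDICT (by name: the statement is the Claim_ definition above) =====
theorem verificar_tipos_spec : Claim_equal_verificar_tipos := by
  intro tokens _
  unfold Spec_verificar_tipos verificar_tipos verificar_tipos_alt
  rw [verificar_tipos_foldl]
  simp
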